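-- pv_equiv track=rewrite | github.com/osso73/pyscripts | scripts/clp-new.py | create_md_toc
-- ===== SOURCE A (Python) =====
-- def create_md_toc(original: str) -> str:
--     """
--     Create Table of Contents from a markdown text.
--     Will go through the original string, and detect any title (lines starting
--     with #), and create an entry in with a anchor, so it can be used as ToC
--     at the beginning of the document.
--     """
--     lines_in = original.split("\n")
--     lines_out = []
--     CHARS_TO_REMOVE = r"./'"
--
--     for line in lines_in:
--         if len(line) == 0 or not line.startswith("#"):
--             continue
--         level, _, title = line.partition(" ")
--         newline = " " * 4 * (len(level) - 1) + "- [" + title + "](#"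
--         for char in title:
--             if char in CHARS_TO_REMOVE:  # characters removed
--                 continue
--             elif char.isalnum():  # letters are kept, but lowercase
--                 newline = newline + char.lower()
--             else:  # any other character replaced by '-'
--                 if (
--                     newline[-1] not in "-#"
--                 ):  # avoid repeating '-' or being first character after #
--                     newline = newline + "-"
--         while newline[-1] == "-":  # eliminate last charcter as '-'
--             newline = newline[:-1]
--
--         newline = newline + ")"
--         lines_out.append(newline)
--
--     final = "\n".join(lines_out)
--     return final
-- ===== SOURCE B (Python) =====
-- def create_md_toc(original: str) -> str:
--     """Same ToC generator; the anchor slug is built as a list of lowercased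
--     alphanumeric words that are dash-joined, instead of appending to the output
--     string while peeking at its last character and stripping trailing dashes."""
--     entries = []
--     for line in original.split("\n"):
--         if not line.startswith("#"):
--             continue
--         level, _, title = line.partition(" ")
--         words = []
--         word = ""
--         for char in title:
--             if char.isalnum():
--                 word += char.lower()
--             elif char not in "./'":
--                 if word:
--                     words.append(word)
--                 word = ""
--         if word:
--             words.append(word)
--         slug = "-".join(words)
--         entries.append(" " * 4 * (len(level) - 1) + "- [" + title + "](#" + slug + ")")
--     return "\n".join(entries)
-- ===== Notes on version B (the rewrite author's own statement) =====
-- stated objective: simpler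
-- what changed: The anchor slug is built as a list of lowercased alphanumeric words that are then dash-joined, replacing A's stateful build that peeks at the last character of the partially built output string to avoid duplicate dashes plus its trailing-dash while-strip loop.
import Mathlib
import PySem

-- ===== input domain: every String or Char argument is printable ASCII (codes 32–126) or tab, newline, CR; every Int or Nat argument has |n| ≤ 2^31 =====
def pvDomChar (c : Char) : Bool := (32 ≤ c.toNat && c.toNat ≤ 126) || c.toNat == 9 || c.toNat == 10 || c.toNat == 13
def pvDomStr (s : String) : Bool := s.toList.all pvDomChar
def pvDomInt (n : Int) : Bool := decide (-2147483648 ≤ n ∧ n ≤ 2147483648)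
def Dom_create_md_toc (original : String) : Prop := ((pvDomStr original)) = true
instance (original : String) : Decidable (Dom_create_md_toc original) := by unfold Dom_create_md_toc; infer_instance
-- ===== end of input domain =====

-- B builds the anchor slug as a list of lowercased alphanumeric words, dash-joined,
-- instead of A's stateful build that peeks at the output's last character and then
-- strips trailing dashes (objective: simpler).

-- ===== PORT A =====

-- hand port of str.partition(" ") (PySem has no partition); exact for the single-char separator:
-- split at the FIRST ' '; if absent, (s, "", "")
def pvPartitionSpace : List Char → List Char × List Char × List Char
  | [] => ([], [], [])
  | c :: t =>
    if c = ' ' then ([], [' '], t)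
    else
      let r := pvPartitionSpace t
      (c :: r.1, r.2.1, r.2.2)

-- the body of A's 'for char in title' loop; 'newline[-1]' via pyGet? (newline is never
-- empty in A, so the .getD default is unreachable)
def pvAStep (nl : List Char) (ch : Char) : List Char :=
  if ch ∈ (['.', '/', '\''] : List Char) then nl
  else if PySem.Chars.isalnum ch then nl ++ [PySem.Chars.lowerChar ch]
  else if ((PySem.List.pyGet? nl (-1)).getD '#') ∈ (['-', '#'] : List Char) then nl
  else nl ++ ['-']

-- A's 'while newline[-1] == "-": newline = newline[:-1]' loop
def pvAStrip (nl : List Char) : List Char :=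
  if h : PySem.List.pyGet? nl (-1) = some '-' then pvAStrip nl.dropLast else nl
termination_by nl.length
decreasing_by
  rcases nl with _ | ⟨a, t⟩
  · simp [PySem.List.pyGet?, PySem.List.pyIdx?] at h
  · simp

def create_md_toc (original : String) : String :=
  let lines_in := PySem.Chars.splitOn original.toList ['\n']
  let lines_out := lines_in.foldl (fun out line =>
    if line.length == 0 || !PySem.Chars.startswith line ['#'] then out
    else
      let p := pvPartitionSpace line
      let level := p.1
      let title := p.2.2
      let newline := List.replicate (4 * (level.length - 1)) ' '
        ++ ('-' :: ' ' :: '[' :: title) ++ (']' :: '(' :: '#' :: [])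
      let newline := title.foldl pvAStep newline
      let newline := pvAStrip newline
      out ++ [newline ++ [')']]) []
  String.ofList (PySem.Chars.join ['\n'] lines_out)

-- ===== PORT B =====

-- body of B's char loop over the title: state = (words so far, current word)
def pvSlugStep (st : List (List Char) × List Char) (ch : Char) : List (List Char) × List Char :=
  if PySem.Chars.isalnum ch then (st.1, st.2 ++ [PySem.Chars.lowerChar ch])
  else if ch ∈ (['.', '/', '\''] : List Char) then st
  else (st.1 ++ (if st.2.isEmpty then [] else [st.2]), [])

def pvSlug (title : List Char) : List Char :=
  let st := title.foldl pvSlugStep ([], [])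
  let words := st.1 ++ (if st.2.isEmpty then [] else [st.2])
  PySem.Chars.join ['-'] words

def create_md_toc_alt (original : String) : String :=
  let entries := (PySem.Chars.splitOn original.toList ['\n']).foldl (fun acc line =>
    if PySem.Chars.startswith line ['#'] then
      let p := pvPartitionSpace line
      acc ++ [List.replicate (4 * (p.1.length - 1)) ' '
        ++ ('-' :: ' ' :: '[' :: p.2.2) ++ (']' :: '(' :: '#' :: pvSlug p.2.2) ++ [')']]
    else acc) []
  String.ofList (PySem.Chars.join ['\n'] entries)

-- ===== PRECONDITION & SPEC =====
def Spec_create_md_toc (original : String) (out : String) : Prop := out = create_md_toc_alt original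
instance (original : String) (out : String) : Decidable (Spec_create_md_toc original out) := by unfold Spec_create_md_toc; infer_instance

-- ===== CLAIM (what is proved, stated in full; the proofs are below) =====
def Claim_equal_create_md_toc : Prop := ∀ (original : String), Dom_create_md_toc original → Spec_create_md_toc original (create_md_toc original)

-- ===== LEMMAS AND PROOFS =====

-- the state machine common to both slugifiers: b = "last emitted is a dash, or nothing
-- emitted yet since the '#'"
def pvF (b : Bool) : List Char → List Char
  | [] => []
  | c :: t =>
    if c ∈ (['.', '/', '\''] : List Char) then pvF b t
    else if PySem.Chars.isalnum c then PySem.Chars.lowerChar c :: pvF false t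
    else if b then pvF b t else '-' :: pvF true t

theorem pv_pyGet_neg_one {α : Type} (xs : List α) : PySem.List.pyGet? xs (-1) = xs.getLast? := by
  simp [PySem.List.pyGet?, PySem.List.pyIdx?]
  rcases xs with _ | ⟨a, t⟩
  · simp
  · simp [List.getLast?_eq_getElem?]

theorem pv_char_le (a b : Char) : (a ≤ b) ↔ a.toNat ≤ b.toNat := by
  rw [Char.le_def, UInt32.le_iff_toNat_le]; rfl

theorem pv_lower_alnum (c : Char) (h : PySem.Chars.isalnum c = true) :
    PySem.Chars.lowerChar c ≠ '-' ∧ PySem.Chars.lowerChar c ≠ '#' := by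
  unfold PySem.Chars.isalnum PySem.Chars.isalpha PySem.Chars.isupper PySem.Chars.islower
    PySem.Chars.isdigit at h
  simp only [Bool.or_eq_true, Bool.and_eq_true, decide_eq_true_eq, pv_char_le] at h
  have hrange : 48 ≤ c.toNat ∧ c.toNat ≤ 122 := by
    simp only [show ('A':Char).toNat = 65 from rfl, show ('Z':Char).toNat = 90 from rfl,
      show ('a':Char).toNat = 97 from rfl, show ('z':Char).toNat = 122 from rfl,
      show ('0':Char).toNat = 48 from rfl, show ('9':Char).toNat = 57 from rfl] at h
    omega
  have key : 48 ≤ (PySem.Chars.lowerChar c).toNat := by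
    unfold PySem.Chars.lowerChar
    split
    · rename_i hu
      unfold PySem.Chars.isupper at hu
      simp only [Bool.and_eq_true, decide_eq_true_eq, pv_char_le] at hu
      rw [Char.toNat_ofNat]
      have hv : (c.toNat + 32).isValidChar := by
        left
        have h90 : c.toNat ≤ 90 := by
          simpa [show ('Z':Char).toNat = 90 from rfl] using hu.2
        omega
      simp [hv]
      omega
    · omega
  constructor <;> intro hc <;> rw [hc] at key <;> simp at key

theorem pvAStrip_nil : pvAStrip [] = [] := by
  unfold pvAStrip; simp [PySem.List.pyGet?, PySem.List.pyIdx?]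

theorem pvAStrip_append (l : List Char) (c : Char) :
    pvAStrip (l ++ [c]) = if c = '-' then pvAStrip l else l ++ [c] := by
  rw [pvAStrip]
  simp [pv_pyGet_neg_one]

theorem pvAStrip_cons_ne (c : Char) (hc : c ≠ '-') (x : List Char) :
    pvAStrip (c :: x) = c :: pvAStrip x := by
  induction x using List.reverseRecOn with
  | nil =>
    rw [pvAStrip]
    simp [pv_pyGet_neg_one, hc, pvAStrip_nil]
  | append_singleton y d ih =>
    rw [show c :: (y ++ [d]) = (c :: y) ++ [d] by simp, pvAStrip_append, pvAStrip_append]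
    split <;> simp [ih]

theorem pvAStrip_cons_dash (x : List Char) :
    pvAStrip ('-' :: x) = if pvAStrip x = [] then [] else '-' :: pvAStrip x := by
  induction x using List.reverseRecOn with
  | nil =>
    rw [pvAStrip]
    simp [pv_pyGet_neg_one, pvAStrip_nil]
  | append_singleton y d ih =>
    rw [show '-' :: (y ++ [d]) = ('-' :: y) ++ [d] by simp, pvAStrip_append, pvAStrip_append]
    split
    · exact ih
    · simp

theorem pvAStrip_through_hash (q s : List Char) :
    pvAStrip (q ++ '#' :: s) = q ++ '#' :: pvAStrip s := by
  induction s using List.reverseRecOn with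
  | nil =>
    rw [show q ++ ['#'] = q ++ ['#'] from rfl, pvAStrip_append]
    simp [pvAStrip_nil]
  | append_singleton y d ih =>
    rw [show q ++ '#' :: (y ++ [d]) = (q ++ '#' :: y) ++ [d] by simp,
        pvAStrip_append, pvAStrip_append]
    split <;> simp [ih]

-- A's loop emits exactly pvF, driven by the last character of the accumulator
theorem pvALoop_eq_pvF (title : List Char) (b : Bool) (pre : List Char) (hne : pre ≠ [])
    (hb : ∀ c, pre.getLast? = some c → ((c = '-' ∨ c = '#') ↔ b = true)) :
    title.foldl pvAStep pre = pre ++ pvF b title := by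
  induction title generalizing pre b with
  | nil => simp [pvF]
  | cons c t ih =>
    rw [List.foldl_cons]
    rcases hlast : pre.getLast? with _ | d
    · rw [List.getLast?_eq_none_iff] at hlast; exact absurd hlast hne
    have hbd := hb d hlast
    by_cases h1 : c ∈ (['.', '/', '\''] : List Char)
    · have hstep : pvAStep pre c = pre := by simp [pvAStep, h1]
      have hF : pvF b (c :: t) = pvF b t := by rw [pvF]; simp [h1]
      rw [hstep, hF]
      exact ih b pre hne hb
    · by_cases h2 : PySem.Chars.isalnum c = true
      · have hstep : pvAStep pre c = pre ++ [PySem.Chars.lowerChar c] := by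
          simp [pvAStep, h1, h2]
        have hF : pvF b (c :: t) = PySem.Chars.lowerChar c :: pvF false t := by
          rw [pvF]; simp [h1, h2]
        rw [hstep, hF, ih false (pre ++ [PySem.Chars.lowerChar c]) (by simp)
            (fun e he => by
              simp [List.getLast?_append] at he
              subst he
              have hl := pv_lower_alnum c h2
              constructor
              · rintro (h | h)
                · exact absurd h hl.1
                · exact absurd h hl.2
              · intro h; cases h)]
        simp
      · rcases b with _ | _
        · -- b = false: last char is neither '-' nor '#', so a '-' is appended
          have hd : ¬ (d = '-' ∨ d = '#') := fun h => by cases hbd.mp h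
          have hstep : pvAStep pre c = pre ++ ['-'] := by
            simp only [pvAStep, h1, if_false, h2, pv_pyGet_neg_one, hlast]
            simp only [Option.getD_some, List.mem_cons, List.not_mem_nil, or_false]
            rw [if_neg hd]
            simp
          have hF : pvF false (c :: t) = '-' :: pvF true t := by
            rw [pvF]; simp [h1, h2]
          rw [hstep, hF, ih true (pre ++ ['-']) (by simp)
              (fun e he => by simp [List.getLast?_append] at he; simp [← he])]
          simp
        · -- b = true: last char is '-' or '#', the '-' is skipped
          have hd : d = '-' ∨ d = '#' := hbd.mpr rfl
          have hstep : pvAStep pre c = pre := by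
            simp only [pvAStep, h1, if_false, h2, pv_pyGet_neg_one, hlast]
            simp only [Option.getD_some, List.mem_cons, List.not_mem_nil, or_false]
            rw [if_pos hd]
            simp
          have hF : pvF true (c :: t) = pvF true t := by
            rw [pvF]; simp [h1, h2]
          rw [hstep, hF]
          exact ih true pre hne hb

-- B's fold only ever appends on the left of the word list
theorem pvSlugStep_shift (t : List Char) (ws : List (List Char)) (w : List Char) :
    t.foldl pvSlugStep (ws, w)
      = (ws ++ (t.foldl pvSlugStep ([], w)).1, (t.foldl pvSlugStep ([], w)).2) := by
  induction t generalizing ws w with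
  | nil => simp
  | cons c t ih =>
    simp only [List.foldl_cons]
    by_cases h2 : PySem.Chars.isalnum c = true
    · have hs : ∀ vs v, pvSlugStep (vs, v) c = (vs, v ++ [PySem.Chars.lowerChar c]) := by
        intro vs v; simp [pvSlugStep, h2]
      rw [hs, hs]
      exact ih ws (w ++ [PySem.Chars.lowerChar c])
    · by_cases h1 : c ∈ (['.', '/', '\''] : List Char)
      · have hs : ∀ vs v, pvSlugStep (vs, v) c = (vs, v) := by
          intro vs v; simp [pvSlugStep, h1, h2]
        rw [hs, hs]
        exact ih ws w
      · have hs : ∀ vs v, pvSlugStep (vs, v) c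
            = (vs ++ (if v.isEmpty then [] else [v]), []) := by
          intro vs v; simp [pvSlugStep, h1, h2]
        rw [hs, hs]
        rw [ih (ws ++ (if w.isEmpty then [] else [w])) []]
        rw [show ([] : List (List Char)) ++ (if w.isEmpty then [] else [w])
              = (if w.isEmpty then [] else [w]) from List.nil_append _] at *
        rw [ih (if w.isEmpty then [] else [w]) []]
        simp

-- every word B collects is nonempty
theorem pvSlug_words_ne (t : List Char) (w : List Char) :
    ∀ x ∈ (t.foldl pvSlugStep ([], w)).1, x ≠ [] := by
  induction t generalizing w with
  | nil => simp
  | cons c t ih =>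
    simp only [List.foldl_cons]
    by_cases h2 : PySem.Chars.isalnum c = true
    · rw [show pvSlugStep ([], w) c = ([], w ++ [PySem.Chars.lowerChar c]) by
        simp [pvSlugStep, h2]]
      exact ih (w ++ [PySem.Chars.lowerChar c])
    · by_cases h1 : c ∈ (['.', '/', '\''] : List Char)
      · rw [show pvSlugStep ([], w) c = ([], w) by simp [pvSlugStep, h1, h2]]
        exact ih w
      · rw [show pvSlugStep ([], w) c = ((if w.isEmpty then [] else [w]), []) by
          simp [pvSlugStep, h1, h2]]
        rw [pvSlugStep_shift]
        intro x hx
        simp only [List.mem_append] at hx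
        rcases hx with hx | hx
        · split at hx <;> simp at hx
          subst hx
          rename_i hw
          simpa [List.isEmpty_iff] using hw
        · exact ih [] x hx

theorem pv_join_cons (a : List Char) (L : List (List Char)) :
    PySem.Chars.join ['-'] (a :: L)
      = a ++ (if L.isEmpty then [] else '-' :: PySem.Chars.join ['-'] L) := by
  rcases L with _ | ⟨b, L⟩
  · simp [PySem.Chars.join_singleton]
  · rw [PySem.Chars.join_cons_cons]
    simp

-- the main slug lemma: B's word fold produces A's emitted-then-stripped slug
theorem pvSlug_eq_strip_pvF (t : List Char) (w : List Char) :
    PySem.Chars.join ['-'] ((t.foldl pvSlugStep ([], w)).1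
      ++ (if (t.foldl pvSlugStep ([], w)).2.isEmpty then []
          else [(t.foldl pvSlugStep ([], w)).2]))
    = w ++ pvAStrip (pvF w.isEmpty t) := by
  induction t generalizing w with
  | nil =>
    simp only [List.foldl_nil, List.nil_append, pvF, pvAStrip_nil, List.append_nil]
    rcases hw : w.isEmpty
    · simp [PySem.Chars.join_singleton]
    · simp [PySem.Chars.join_nil, List.isEmpty_iff.mp hw]
  | cons c t ih =>
    simp only [List.foldl_cons]
    by_cases h2 : PySem.Chars.isalnum c = true
    · have h1 : c ∉ (['.', '/', '\''] : List Char) := by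
        intro hm
        simp only [List.mem_cons, List.not_mem_nil, or_false] at hm
        rcases hm with rfl | rfl | rfl <;> simp [PySem.Chars.isalnum, PySem.Chars.isalpha,
          PySem.Chars.isupper, PySem.Chars.islower, PySem.Chars.isdigit] at h2
      rw [show pvSlugStep ([], w) c = ([], w ++ [PySem.Chars.lowerChar c]) by
        simp [pvSlugStep, h2]]
      rw [show pvF w.isEmpty (c :: t)
            = PySem.Chars.lowerChar c :: pvF false t by rw [pvF]; simp [h1, h2]]
      have ih' := ih (w ++ [PySem.Chars.lowerChar c])
      rw [show (w ++ [PySem.Chars.lowerChar c]).isEmpty = false by simp] at ih'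
      rw [ih', pvAStrip_cons_ne _ (pv_lower_alnum c h2).1]
      simp
    · by_cases h1 : c ∈ (['.', '/', '\''] : List Char)
      · rw [show pvSlugStep ([], w) c = ([], w) by simp [pvSlugStep, h1, h2]]
        rw [show pvF w.isEmpty (c :: t) = pvF w.isEmpty t by rw [pvF]; simp [h1]]
        exact ih w
      · rw [show pvSlugStep ([], w) c = ((if w.isEmpty then [] else [w]), []) by
          simp [pvSlugStep, h1, h2]]
        rcases hw : w.isEmpty
        · -- current word nonempty: B flushes it; A emits a '-' (b = false)
          have hwne : w ≠ [] := by simpa [List.isEmpty_iff] using hw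
          rw [if_neg (by simp),
              show pvF false (c :: t) = '-' :: pvF true t by rw [pvF]; simp [h1, h2],
              pvAStrip_cons_dash, pvSlugStep_shift t [w] []]
          have ih0 := ih []
          simp only [List.isEmpty_nil, List.nil_append] at ih0
          have hne := pvSlug_words_ne t []
          dsimp only
          rw [List.append_assoc, List.singleton_append, pv_join_cons]
          rcases hM : ((t.foldl pvSlugStep ([], [])).1
              ++ (if (t.foldl pvSlugStep ([], [])).2.isEmpty then []
                  else [(t.foldl pvSlugStep ([], [])).2])) with _ | ⟨m, M⟩
          · rw [hM, PySem.Chars.join_nil] at ih0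
            simp [← ih0]
          · have hmne : m ≠ [] := by
              have hmem : m ∈ ((t.foldl pvSlugStep ([], [])).1
                  ++ (if (t.foldl pvSlugStep ([], [])).2.isEmpty then []
                      else [(t.foldl pvSlugStep ([], [])).2])) := by
                rw [hM]; exact List.mem_cons_self
              rcases List.mem_append.mp hmem with h | h
              · exact hne m h
              · split at h <;> simp at h
                subst h
                rename_i hw2
                simpa [List.isEmpty_iff] using hw2
            have hjoin_ne : PySem.Chars.join ['-'] (m :: M) ≠ [] := by
              rw [pv_join_cons]
              simp [hmne]
            rw [hM] at ih0
            rw [if_neg (by simp), if_neg (by rw [ih0] at hjoin_ne; exact hjoin_ne), ← ih0]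
        · -- current word empty: B flushes nothing; A skips the '-' (b = true)
          have hwnil : w = [] := List.isEmpty_iff.mp hw
          subst hwnil
          simp only [if_true]
          rw [show pvF true (c :: t) = pvF true t by rw [pvF]; simp [h1, h2]]
          have ih0 := ih []
          simp only [List.isEmpty_nil] at ih0
          simpa using ih0

-- one line's entry: A's build-and-strip equals B's direct assembly
theorem pv_entry_eq (level title : List Char) :
    pvAStrip (title.foldl pvAStep
        (List.replicate (4 * (level.length - 1)) ' '
          ++ ('-' :: ' ' :: '[' :: title) ++ (']' :: '(' :: '#' :: []))) ++ [')']
    = List.replicate (4 * (level.length - 1)) ' '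
        ++ ('-' :: ' ' :: '[' :: title) ++ (']' :: '(' :: '#' :: pvSlug title) ++ [')'] := by
  set q : List Char := List.replicate (4 * (level.length - 1)) ' '
      ++ ('-' :: ' ' :: '[' :: title) ++ [']', '('] with hq
  have hpre : List.replicate (4 * (level.length - 1)) ' '
      ++ ('-' :: ' ' :: '[' :: title) ++ (']' :: '(' :: '#' :: []) = q ++ ['#'] := by
    simp [hq]
  rw [hpre, pvALoop_eq_pvF title true (q ++ ['#']) (by simp)
      (fun c hc => by
        simp [List.getLast?_append] at hc
        subst hc
        simp)]
  rw [show q ++ ['#'] ++ pvF true title = q ++ '#' :: pvF true title by simp,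
      pvAStrip_through_hash]
  have hslug := pvSlug_eq_strip_pvF title []
  simp only [List.isEmpty_nil, List.nil_append] at hslug
  rw [show pvSlug title
        = PySem.Chars.join ['-'] ((title.foldl pvSlugStep ([], [])).1
            ++ (if (title.foldl pvSlugStep ([], [])).2.isEmpty then []
                else [(title.foldl pvSlugStep ([], [])).2])) from rfl,
      hslug]
  simp [hq]

-- the two outer per-line step functions are literally equal
theorem pv_step_eq :
    (fun (out : List (List Char)) (line : List Char) =>
      if line.length == 0 || !PySem.Chars.startswith line ['#'] then out
      else
        let p := pvPartitionSpace line
        let level := p.1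
        let title := p.2.2
        let newline := List.replicate (4 * (level.length - 1)) ' '
          ++ ('-' :: ' ' :: '[' :: title) ++ (']' :: '(' :: '#' :: [])
        let newline := title.foldl pvAStep newline
        let newline := pvAStrip newline
        out ++ [newline ++ [')']])
    = (fun (acc : List (List Char)) (line : List Char) =>
      if PySem.Chars.startswith line ['#'] then
        let p := pvPartitionSpace line
        acc ++ [List.replicate (4 * (p.1.length - 1)) ' '
          ++ ('-' :: ' ' :: '[' :: p.2.2) ++ (']' :: '(' :: '#' :: pvSlug p.2.2) ++ [')']]
      else acc) := by
  funext out line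
  rcases line with _ | ⟨c, l⟩
  · simp [PySem.Chars.startswith]
  · rcases hsw : PySem.Chars.startswith (c :: l) ['#']
    · simp
    · have h := pv_entry_eq (pvPartitionSpace (c :: l)).1 (pvPartitionSpace (c :: l)).2.2
      simpa using h

-- ===== VERDICT (by name: the statement is the Claim_ definition above) =====
theorem create_md_toc_spec : Claim_equal_create_md_toc := by
  intro original _
  unfold Spec_create_md_toc create_md_toc create_md_toc_alt
  rw [pv_step_eq]
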